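-- pv_equiv track=rewrite | github.com/apocryphalcontent-max/Void | nlp/nl_specification.py | _infer_name
-- ===== SOURCE A (Python) =====
-- def _infer_name(description: str) -> str:
--     """Infer tool name from description"""
--     words = description.lower().split()
--     action_verbs = ['detect', 'analyze', 'compute', 'calculate', 'monitor']
--
--     for verb in action_verbs:
--         if verb in words:
--             idx = words.index(verb)
--             if idx + 1 < len(words):
--                 return f"{verb}_{words[idx+1]}"
--
--     return "custom_tool"
-- ===== SOURCE B (Python) =====
-- def _infer_name(description: str) -> str:
--     """Infer tool name from description (single pass over adjacent word pairs)."""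
--     words = description.lower().split()
--     rank = {v: i for i, v in enumerate(['detect', 'analyze', 'compute', 'calculate', 'monitor'])}
--     best = None
--     for w, nxt in zip(words, words[1:]):
--         r = rank.get(w)
--         if r is not None and (best is None or r < best[0]):
--             best = (r, f"{w}_{nxt}")
--     return best[1] if best else "custom_tool"
-- ===== Notes on version B (the rewrite author's own statement) =====
-- stated objective: alternative
-- what changed: A scans the word list up to twice per verb (membership test plus .index) with an early return; B builds a verb->priority dict once and makes a single left-to-right pass over adjacent word pairs, keeping the candidate whose priority is strictly smallest so the first occurrence of the highest-priority verb wins.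
import Mathlib
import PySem

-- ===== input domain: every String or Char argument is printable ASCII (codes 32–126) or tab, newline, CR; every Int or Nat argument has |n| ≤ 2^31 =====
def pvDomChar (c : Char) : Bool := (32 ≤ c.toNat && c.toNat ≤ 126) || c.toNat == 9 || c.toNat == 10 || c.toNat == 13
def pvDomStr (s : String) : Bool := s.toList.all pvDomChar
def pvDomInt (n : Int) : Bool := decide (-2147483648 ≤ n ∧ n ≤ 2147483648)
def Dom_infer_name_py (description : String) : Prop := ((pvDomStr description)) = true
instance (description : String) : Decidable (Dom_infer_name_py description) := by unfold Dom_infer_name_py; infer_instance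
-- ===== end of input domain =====

-- B replaces A's five whole-list scans (membership + .index per verb) by one left-to-right pass
-- over adjacent word pairs that keeps the best-priority match; same return value everywhere.

-- ===== PORT A =====
def inferVerbs : List String := ["detect", "analyze", "compute", "calculate", "monitor"]

-- the `for verb in action_verbs` loop with its early return
def inferGoA (ws : List String) : List String → String
  | [] => "custom_tool"
  | v :: rest =>
    if ws.contains v then
      let idx := (PySem.List.index? ws v).getD 0
      if (idx : Int) + 1 < (ws.length : Int) then
        v ++ "_" ++ PySem.List.pyGetD ws ((idx : Int) + 1) ""
      else inferGoA ws rest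
    else inferGoA ws rest

def infer_name_py (description : String) : String :=
  inferGoA (PySem.Str.split₀ (PySem.Str.lower description)) inferVerbs

-- ===== PORT B =====
-- rank = {v: i for i, v in enumerate(action_verbs)}
def inferRank : PySem.Dict String Int :=
  (PySem.List.enumerate inferVerbs 0).foldl (fun d p => d.insert p.2 p.1) PySem.Dict.empty

-- loop body: keep the candidate of strictly smallest rank, first occurrence wins
def inferStep (rank : PySem.Dict String Int) (best : Option (Int × String))
    (p : String × String) : Option (Int × String) :=
  match PySem.Dict.get? rank p.1 with
  | some r =>
    match best with
    | none => some (r, p.1 ++ "_" ++ p.2)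
    | some (br, s) => if r < br then some (r, p.1 ++ "_" ++ p.2) else some (br, s)
  | none => best

def infer_name_py_alt (description : String) : String :=
  let words := PySem.Str.split₀ (PySem.Str.lower description)
  match (words.zip (words.drop 1)).foldl (inferStep inferRank) none with
  | some q => q.2
  | none => "custom_tool"

-- ===== PRECONDITION & SPEC =====
def Spec_infer_name_py (description : String) (out : String) : Prop := out = infer_name_py_alt description
instance (description : String) (out : String) : Decidable (Spec_infer_name_py description out) := by unfold Spec_infer_name_py; infer_instance

-- ===== CLAIM (what is proved, stated in full; the proofs are below) =====
def Claim_equal_infer_name_py : Prop := ∀ (description : String), Dom_infer_name_py description → Spec_infer_name_py description (infer_name_py description)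

-- ===== LEMMAS AND PROOFS =====

-- rank of a word in a verb list: some 0 at the head, shifted by one further down
def rnk : List String → String → Option Int
  | [], _ => none
  | v :: rest, w => if w = v then some 0 else (rnk rest w).map (· + 1)

-- inferStep with the rank dict abstracted to a function
def gstep (rank : String → Option Int) (best : Option (Int × String))
    (p : String × String) : Option (Int × String) :=
  match rank p.1 with
  | some r =>
    match best with
    | none => some (r, p.1 ++ "_" ++ p.2)
    | some (br, s) => if r < br then some (r, p.1 ++ "_" ++ p.2) else some (br, s)
  | none => best

def shiftB : Option (Int × String) → Option (Int × String) :=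
  Option.map (fun q => (q.1 + 1, q.2))

theorem gstep_rank_none {rank : String → Option Int} {p : String × String}
    (h : rank p.1 = none) (acc : Option (Int × String)) : gstep rank acc p = acc := by
  unfold gstep; rw [h]

theorem gstep_rank_some_none {rank : String → Option Int} {p : String × String} {r : Int}
    (h : rank p.1 = some r) : gstep rank none p = some (r, p.1 ++ "_" ++ p.2) := by
  unfold gstep; rw [h]

theorem gstep_rank_some_some {rank : String → Option Int} {p : String × String} {r br : Int}
    (h : rank p.1 = some r) (s : String) :
    gstep rank (some (br, s)) p =
      if r < br then some (r, p.1 ++ "_" ++ p.2) else some (br, s) := by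
  unfold gstep; rw [h]

theorem rank_eq (w : String) : PySem.Dict.get? inferRank w = rnk inferVerbs w := by
  by_cases h1 : w = "detect"
  · subst h1; decide
  by_cases h2 : w = "analyze"
  · subst h2; decide
  by_cases h3 : w = "compute"
  · subst h3; decide
  by_cases h4 : w = "calculate"
  · subst h4; decide
  by_cases h5 : w = "monitor"
  · subst h5; decide
  have e1 : ("detect" == w) = false := beq_eq_false_iff_ne.mpr (fun e => h1 e.symm)
  have e2 : ("analyze" == w) = false := beq_eq_false_iff_ne.mpr (fun e => h2 e.symm)
  have e3 : ("compute" == w) = false := beq_eq_false_iff_ne.mpr (fun e => h3 e.symm)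
  have e4 : ("calculate" == w) = false := beq_eq_false_iff_ne.mpr (fun e => h4 e.symm)
  have e5 : ("monitor" == w) = false := beq_eq_false_iff_ne.mpr (fun e => h5 e.symm)
  simp [PySem.Dict.get?, inferVerbs, rnk, inferRank, PySem.List.enumerate, PySem.Dict.insert,
    PySem.Dict.empty, List.find?, e1, e2, e3, e4, e5, h1, h2, h3, h4, h5]

theorem step_eq : inferStep inferRank = gstep (rnk inferVerbs) := by
  funext b p
  simp only [inferStep, gstep, rank_eq]

theorem rnk_nonneg : ∀ (vs : List String) (w : String) (r : Int), rnk vs w = some r → 0 ≤ r := by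
  intro vs
  induction vs with
  | nil => intro w r h; simp [rnk] at h
  | cons v rest ih =>
    intro w r h
    by_cases hv : w = v
    · simp [rnk, hv] at h; omega
    · simp [rnk, hv] at h
      obtain ⟨r', hr', rfl⟩ := h
      have := ih w r' hr'; omega

-- once a rank-0 candidate is held, it is never replaced
theorem pin (rank : String → Option Int) (hr : ∀ w r, rank w = some r → 0 ≤ r)
    (ps : List (String × String)) (s : String) :
    ps.foldl (gstep rank) (some (0, s)) = some (0, s) := by
  induction ps with
  | nil => rfl
  | cons p t ih =>
    have h0 : gstep rank (some (0, s)) p = some (0, s) := by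
      cases h : rank p.1 with
      | none => exact gstep_rank_none h _
      | some r =>
        rw [gstep_rank_some_some h]
        have := hr p.1 r h
        simp [show ¬ r < 0 by omega]
    simp [List.foldl_cons, h0, ih]

-- with no verbs left, the fold does nothing
theorem fold_rnk_nil (ps : List (String × String)) (acc : Option (Int × String)) :
    ps.foldl (gstep (rnk [])) acc = acc := by
  induction ps generalizing acc with
  | nil => rfl
  | cons p t ih =>
    rw [List.foldl_cons, gstep_rank_none (show rnk [] p.1 = none from rfl), ih]

-- a gstep over a nonneg rank function keeps the held rank nonneg
theorem gstep_nonneg {rank : String → Option Int} (hr : ∀ w r, rank w = some r → 0 ≤ r)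
    {acc : Option (Int × String)} (hacc : ∀ q, acc = some q → 0 ≤ q.1)
    (p : String × String) : ∀ q, gstep rank acc p = some q → 0 ≤ q.1 := by
  intro q hq
  cases h : rank p.1 with
  | none => rw [gstep_rank_none h] at hq; exact hacc q hq
  | some r =>
    have hr0 : 0 ≤ r := hr p.1 r h
    cases hc : acc with
    | none =>
      subst hc; rw [gstep_rank_some_none h] at hq
      cases hq; exact hr0
    | some q' =>
      obtain ⟨br, s⟩ := q'
      subst hc; rw [gstep_rank_some_some h] at hq
      by_cases hlt : r < br
      · rw [if_pos hlt] at hq; cases hq; exact hr0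
      · rw [if_neg hlt] at hq; cases hq; exact hacc (br, s) rfl

-- peeling one verb off the rank function: a hit on the head verb wins and is pinned;
-- otherwise the fold is the rest-fold with all ranks shifted up by one
theorem main0 (v : String) (rest : List String) (ps : List (String × String)) :
    ∀ acc : Option (Int × String), (∀ q, acc = some q → 0 ≤ q.1) →
    ps.foldl (gstep (rnk (v :: rest))) (shiftB acc) =
      (match ps.find? (fun p => p.1 == v) with
      | some p => some ((0 : Int), p.1 ++ "_" ++ p.2)
      | none => shiftB (ps.foldl (gstep (rnk rest)) acc)) := by
  induction ps with
  | nil => intro acc _; rfl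
  | cons p t ih =>
    intro acc hacc
    by_cases hv : p.1 = v
    · have hrank : rnk (v :: rest) p.1 = some 0 := by simp [rnk, hv]
      have hstep : gstep (rnk (v :: rest)) (shiftB acc) p = some (0, p.1 ++ "_" ++ p.2) := by
        cases hc : acc with
        | none => subst hc; exact gstep_rank_some_none hrank
        | some q =>
          obtain ⟨br, s⟩ := q
          have h0 : (0 : Int) < br + 1 := by have := hacc (br, s) hc; simpa using by omega
          subst hc
          rw [show shiftB (some (br, s)) = some (br + 1, s) from rfl,
            gstep_rank_some_some hrank, if_pos h0]
      rw [List.foldl_cons, hstep, pin _ (rnk_nonneg (v :: rest)) t,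
        List.find?_cons_of_pos (by simpa using hv)]
    · have hrank : rnk (v :: rest) p.1 = (rnk rest p.1).map (· + 1) := by simp [rnk, hv]
      have hstep : gstep (rnk (v :: rest)) (shiftB acc) p = shiftB (gstep (rnk rest) acc p) := by
        cases hr : rnk rest p.1 with
        | none =>
          have h' : rnk (v :: rest) p.1 = none := by rw [hrank, hr]; rfl
          rw [gstep_rank_none h', gstep_rank_none hr]
        | some r =>
          have h' : rnk (v :: rest) p.1 = some (r + 1) := by rw [hrank, hr]; rfl
          cases hc : acc with
          | none =>
            subst hc
            rw [show shiftB none = none from rfl,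
              gstep_rank_some_none h', gstep_rank_some_none hr]; rfl
          | some q =>
            obtain ⟨br, s⟩ := q
            subst hc
            rw [show shiftB (some (br, s)) = some (br + 1, s) from rfl,
              gstep_rank_some_some h', gstep_rank_some_some hr]
            by_cases hlt : r < br
            · rw [if_pos (by omega : r + 1 < br + 1), if_pos hlt]; rfl
            · rw [if_neg (by omega : ¬ r + 1 < br + 1), if_neg hlt]; rfl
      rw [List.foldl_cons, hstep,
        ih (gstep (rnk rest) acc p) (gstep_nonneg (rnk_nonneg rest) hacc p),
        List.find?_cons_of_neg (by simp [hv]), List.foldl_cons]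

-- the find? over adjacent pairs is A's (first index, next word) computation
theorem zipF (v : String) : ∀ (ws : List String),
    (ws.zip (ws.drop 1)).find? (fun p => p.1 == v) =
      (PySem.List.index? ws v).bind (fun idx =>
        if idx + 1 < ws.length then some (v, ws.getD (idx + 1) "") else none) := by
  intro ws
  induction ws with
  | nil => rfl
  | cons w t ih =>
    cases t with
    | nil =>
      by_cases hv : w = v
      · subst hv; rw [PySem.List.index?_cons_self]; simp
      · rw [PySem.List.index?_cons_of_ne _ hv]
        simp [PySem.List.index?]
    | cons u t' =>
      by_cases hv : w = v
      · subst hv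
        rw [PySem.List.index?_cons_self]
        simp [List.zip]
      · have hzip : ((w :: u :: t').zip ((w :: u :: t').drop 1)) =
            (w, u) :: ((u :: t').zip ((u :: t').drop 1)) := by simp
        rw [hzip, List.find?_cons_of_neg (by simp [hv]), ih,
          PySem.List.index?_cons_of_ne _ hv]
        cases h : PySem.List.index? (u :: t') v with
        | none => simp
        | some j =>
          simp only [Option.map_some, Option.bind_some, List.length_cons, List.getD_cons_succ]
          by_cases hj : j + 1 < t'.length + 1 <;>
            simp [hj, show j + 1 + 1 < t'.length + 1 + 1 ↔ j + 1 < t'.length + 1 from by omega]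

-- A's verb loop equals B's single pass, for any verb list
theorem goA_eq (vs : List String) : ∀ (ws : List String),
    inferGoA ws vs =
      (match (ws.zip (ws.drop 1)).foldl (gstep (rnk vs)) none with
      | some q => q.2
      | none => "custom_tool") := by
  induction vs with
  | nil =>
    intro ws
    rw [fold_rnk_nil]
    rfl
  | cons v rest ih =>
    intro ws
    have hm := main0 v rest (ws.zip (ws.drop 1)) none (by intro q h; cases h)
    simp only [shiftB, Option.map_none] at hm
    rw [hm, zipF v ws]
    cases hidx : PySem.List.index? ws v with
    | none =>
      have hmem : v ∉ ws := (PySem.List.index?_eq_none_iff ws v).mp hidx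
      have hc : ws.contains v = false := by simpa using hmem
      simp only [inferGoA, hc, Bool.false_eq_true, if_false, Option.bind_none]
      rw [ih ws]
      cases (ws.zip (ws.drop 1)).foldl (gstep (rnk rest)) none <;> rfl
    | some idx =>
      have hmem : v ∈ ws := by
        by_contra hmem
        rw [(PySem.List.index?_eq_none_iff ws v).mpr hmem] at hidx; cases hidx
      have hc : ws.contains v = true := by simpa using hmem
      simp only [inferGoA, hc, if_true, hidx, Option.getD_some, Option.bind_some]
      by_cases hlt : idx + 1 < ws.length
      · have hlt' : (idx : Int) + 1 < (ws.length : Int) := by exact_mod_cast hlt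
        have hget : PySem.List.pyGetD ws ((idx : Int) + 1) "" = ws.getD (idx + 1) "" := by
          have h := PySem.List.pyGetD_natCast ws (idx + 1) ""
          rw [← h]; push_cast; ring_nf
        simp [hlt, hlt', hget]
      · have hlt' : ¬ ((idx : Int) + 1 < (ws.length : Int)) := by exact_mod_cast hlt
        simp only [hlt, hlt', if_false]
        rw [ih ws]
        cases (ws.zip (ws.drop 1)).foldl (gstep (rnk rest)) none <;> rfl

-- ===== VERDICT (by name: the statement is the Claim_ definition above) =====
theorem infer_name_py_spec : Claim_equal_infer_name_py := by
  intro description _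
  unfold Spec_infer_name_py infer_name_py infer_name_py_alt
  rw [step_eq]
  exact goA_eq inferVerbs (PySem.Str.split₀ (PySem.Str.lower description))
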